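-- pv_equiv track=rewrite | github.com/gunhee8178/2021_skku_edutem | bert server/my_utils.py | sort_category
-- ===== SOURCE A (Python) =====
-- def sort_category(e):
--     type_dict = {}
--     type_dict['Grammar'] = ['ADJ', 'ADV', 'NOUN', 'PART', 'PREP', 'PRON', 'VERB', 'WO', 'NOUN:INFL', 'VERB:FORM', 'VERB:INFL']
--     type_dict['Usage'] = ['CONJ', 'DET', 'CONTR', 'MORPH', 'ORTH', 'ADJ:FORM', 'NOUN:NUM', 'NOUN:POSS', 'VERB:SVA', 'VERB:TENSE']
--     type_dict['Spelling'] = ['SPELL']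
--     type_dict['Punctuation'] = ['PUCNT']
--     type_dict['Other'] = ['OTHER']
--
--     type_info = e.split(':', 1)[-1]
--     category = 'Other'
--     for key in type_dict.keys():
--         if type_info in type_dict[key]:
--             category = key
--             break
--
--     return category
-- ===== SOURCE B (Python) =====
-- # Binary search over one sorted (code, category) table instead of scanning the five category lists.
-- _PAIRS = [
--     ('ADJ', 'Grammar'), ('ADJ:FORM', 'Usage'), ('ADV', 'Grammar'), ('CONJ', 'Usage'),
--     ('CONTR', 'Usage'), ('DET', 'Usage'), ('MORPH', 'Usage'), ('NOUN', 'Grammar'),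
--     ('NOUN:INFL', 'Grammar'), ('NOUN:NUM', 'Usage'), ('NOUN:POSS', 'Usage'), ('ORTH', 'Usage'),
--     ('OTHER', 'Other'), ('PART', 'Grammar'), ('PREP', 'Grammar'), ('PRON', 'Grammar'),
--     ('PUCNT', 'Punctuation'), ('SPELL', 'Spelling'), ('VERB', 'Grammar'), ('VERB:FORM', 'Grammar'),
--     ('VERB:INFL', 'Grammar'), ('VERB:SVA', 'Usage'), ('VERB:TENSE', 'Usage'), ('WO', 'Grammar'),
-- ]
--
--
-- def _find(ti, lo, hi):
--     if lo >= hi: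
--         return 'Other'
--     mid = (lo + hi) // 2
--     code, cat = _PAIRS[mid]
--     if ti == code:
--         return cat
--     if ti < code:
--         return _find(ti, lo, mid)
--     return _find(ti, mid + 1, hi)
--
--
-- def sort_category(e):
--     return _find(e.split(':', 1)[-1], 0, len(_PAIRS))
-- ===== Notes on version B (the rewrite author's own statement) =====
-- stated objective: alternative
-- what changed: Replaces A's linear scan over the five category lists by a recursive binary search over one flattened (code, category) table sorted by code, falling back to the default category when the search range empties.
import Mathlib
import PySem

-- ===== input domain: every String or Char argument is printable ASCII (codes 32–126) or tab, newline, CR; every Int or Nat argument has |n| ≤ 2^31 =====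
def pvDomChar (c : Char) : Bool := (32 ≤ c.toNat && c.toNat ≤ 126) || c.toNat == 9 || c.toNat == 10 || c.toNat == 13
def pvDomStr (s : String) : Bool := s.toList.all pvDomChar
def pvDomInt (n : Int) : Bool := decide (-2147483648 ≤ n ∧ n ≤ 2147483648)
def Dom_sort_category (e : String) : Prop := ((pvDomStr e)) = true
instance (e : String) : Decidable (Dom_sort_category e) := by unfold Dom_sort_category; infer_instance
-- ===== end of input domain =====

-- B replaces A's linear scan over the five category lists by a recursive binary search over one sorted (code, category) table (alternative decomposition; same results).


-- ===== PORT A =====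
-- the five category lists of A's type_dict, built in insertion order
def typeDict_A : PySem.Dict String (List String) :=
  ((((PySem.Dict.empty.insert "Grammar" ["ADJ", "ADV", "NOUN", "PART", "PREP", "PRON", "VERB", "WO", "NOUN:INFL", "VERB:FORM", "VERB:INFL"]).insert
      "Usage" ["CONJ", "DET", "CONTR", "MORPH", "ORTH", "ADJ:FORM", "NOUN:NUM", "NOUN:POSS", "VERB:SVA", "VERB:TENSE"]).insert
      "Spelling" ["SPELL"]).insert
      "Punctuation" ["PUCNT"]).insert
      "Other" ["OTHER"]

-- A's for-loop over type_dict.keys() with break: first key whose list contains type_info, else the initial 'Other'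
def loopA (keys : List String) (ti : String) : String :=
  match keys with
  | [] => "Other"
  | k :: rest => if ti ∈ typeDict_A.getD k [] then k else loopA rest ti

def sort_category (e : String) : String :=
  let type_info := PySem.List.pyGetD ((PySem.Str.splitMax? e ":" 1).getD []) (-1) ""
  loopA typeDict_A.keys type_info

-- ===== PORT B =====
-- B's table: all 24 (code, category) pairs, sorted by code
def pairsB : List (String × String) :=
  [("ADJ", "Grammar"), ("ADJ:FORM", "Usage"), ("ADV", "Grammar"), ("CONJ", "Usage"),
   ("CONTR", "Usage"), ("DET", "Usage"), ("MORPH", "Usage"), ("NOUN", "Grammar"),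
   ("NOUN:INFL", "Grammar"), ("NOUN:NUM", "Usage"), ("NOUN:POSS", "Usage"), ("ORTH", "Usage"),
   ("OTHER", "Other"), ("PART", "Grammar"), ("PREP", "Grammar"), ("PRON", "Grammar"),
   ("PUCNT", "Punctuation"), ("SPELL", "Spelling"), ("VERB", "Grammar"), ("VERB:FORM", "Grammar"),
   ("VERB:INFL", "Grammar"), ("VERB:SVA", "Usage"), ("VERB:TENSE", "Usage"), ("WO", "Grammar")]

-- B's recursive binary search _find(ti, lo, hi); fuel ≥ hi - lo makes the recursion structural
-- (with enough fuel the 0-case is never reached: when fuel = 0 we have lo ≥ hi, Python's base case)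
def findB (ti : String) : Nat → Nat → Nat → String
  | 0, _, _ => "Other"
  | fuel + 1, lo, hi =>
    if hi ≤ lo then "Other"
    else if ti == (pairsB.getD ((lo + hi) / 2) ("", "Other")).1 then
      (pairsB.getD ((lo + hi) / 2) ("", "Other")).2
    -- Python's 'ti < code' is code-point lexicographic = PySem.Chars.strLt on .toList (exact)
    else if PySem.Chars.strLt ti.toList (pairsB.getD ((lo + hi) / 2) ("", "Other")).1.toList then
      findB ti fuel lo ((lo + hi) / 2)
    else findB ti fuel ((lo + hi) / 2 + 1) hi

def sort_category_alt (e : String) : String :=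
  findB (PySem.List.pyGetD ((PySem.Str.splitMax? e ":" 1).getD []) (-1) "") pairsB.length 0 pairsB.length

-- ===== PRECONDITION & SPEC =====
def Spec_sort_category (e : String) (out : String) : Prop := out = sort_category_alt e
instance (e : String) (out : String) : Decidable (Spec_sort_category e out) := by unfold Spec_sort_category; infer_instance

-- ===== CLAIM (what is proved, stated in full; the proofs are below) =====
def Claim_equal_sort_category : Prop := ∀ (e : String), Dom_sort_category e → Spec_sort_category e (sort_category e)

-- ===== LEMMAS AND PROOFS =====
-- the binary search either reports 'Other' or returns the category of a table pair whose code equals ti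
theorem findB_mem (fuel lo hi : Nat) (ti : String) :
    findB ti fuel lo hi = "Other" ∨ ∃ p ∈ pairsB, p.1 = ti ∧ findB ti fuel lo hi = p.2 := by
  induction fuel generalizing lo hi with
  | zero => exact Or.inl rfl
  | succ fuel ih =>
    rw [findB]
    split_ifs with hlh heq hlt
    · exact Or.inl rfl
    · by_cases hm : (lo + hi) / 2 < pairsB.length
      · exact Or.inr ⟨pairsB.getD ((lo + hi) / 2) ("", "Other"),
          by rw [List.getD_eq_getElem _ _ hm]; exact List.getElem_mem hm,
          (eq_of_beq heq).symm, rfl⟩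
      · rw [List.getD_eq_default _ _ (Nat.le_of_not_lt hm)]
        exact Or.inl rfl
    · exact ih lo ((lo + hi) / 2)
    · exact ih ((lo + hi) / 2 + 1) hi

-- the whole claim reduces to: for every string ti, A's scan over the five lists agrees with B's binary search
theorem loopA_eq_findB (ti : String) :
    loopA typeDict_A.keys ti = findB ti pairsB.length 0 pairsB.length := by
  by_cases h1 : ti = "ADJ"
  · subst h1; decide
  by_cases h2 : ti = "ADV"
  · subst h2; decide
  by_cases h3 : ti = "NOUN"
  · subst h3; decide
  by_cases h4 : ti = "PART"
  · subst h4; decide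
  by_cases h5 : ti = "PREP"
  · subst h5; decide
  by_cases h6 : ti = "PRON"
  · subst h6; decide
  by_cases h7 : ti = "VERB"
  · subst h7; decide
  by_cases h8 : ti = "WO"
  · subst h8; decide
  by_cases h9 : ti = "NOUN:INFL"
  · subst h9; decide
  by_cases h10 : ti = "VERB:FORM"
  · subst h10; decide
  by_cases h11 : ti = "VERB:INFL"
  · subst h11; decide
  by_cases h12 : ti = "CONJ"
  · subst h12; decide
  by_cases h13 : ti = "DET"
  · subst h13; decide
  by_cases h14 : ti = "CONTR"
  · subst h14; decide
  by_cases h15 : ti = "MORPH"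
  · subst h15; decide
  by_cases h16 : ti = "ORTH"
  · subst h16; decide
  by_cases h17 : ti = "ADJ:FORM"
  · subst h17; decide
  by_cases h18 : ti = "NOUN:NUM"
  · subst h18; decide
  by_cases h19 : ti = "NOUN:POSS"
  · subst h19; decide
  by_cases h20 : ti = "VERB:SVA"
  · subst h20; decide
  by_cases h21 : ti = "VERB:TENSE"
  · subst h21; decide
  by_cases h22 : ti = "SPELL"
  · subst h22; decide
  by_cases h23 : ti = "PUCNT"
  · subst h23; decide
  by_cases h24 : ti = "OTHER"
  · subst h24; decide
  -- generic case: ti is none of the 24 codes, so both sides return 'Other'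
  have hB : findB ti pairsB.length 0 pairsB.length = "Other" := by
    rcases findB_mem pairsB.length 0 pairsB.length ti with h | ⟨p, hp, hpt, _⟩
    · exact h
    · exfalso
      simp only [pairsB, List.mem_cons, List.not_mem_nil, or_false] at hp
      rcases hp with rfl|rfl|rfl|rfl|rfl|rfl|rfl|rfl|rfl|rfl|rfl|rfl|rfl|rfl|rfl|rfl|rfl|rfl|rfl|rfl|rfl|rfl|rfl|rfl <;>
        simp_all
  rw [hB]
  simp [loopA, typeDict_A, PySem.Dict.keys, PySem.Dict.getD,
    PySem.Dict.get?, PySem.Dict.insert, PySem.Dict.empty,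
    List.find?, h1, h2, h3, h4, h5, h6, h7, h8, h9, h10, h11, h12, h13, h14, h15, h16, h17,
    h18, h19, h20, h21, h22, h23, h24]

-- ===== VERDICT (by name: the statement is the Claim_ definition above) =====
theorem sort_category_spec : Claim_equal_sort_category := by
  intro e _
  unfold Spec_sort_category sort_category sort_category_alt
  exact loopA_eq_findB _
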